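-- pv_equiv track=rewrite | github.com/GeorgeDoors888/GB-Power-Market-JJ | parse_nged_charging_files.py | find_tariff_sheets
-- ===== SOURCE A (Python) =====
-- def find_tariff_sheets(sheets):
--     """Identify sheets likely to contain tariff data"""
--     tariff_keywords = [
--         'annex', 'lv', 'hv', 'ehv', 'charge', 'tariff', 'rate',
--         'domestic', 'non-domestic', 'unmetered', 'ums',
--         'capacity', 'unit', 'schedule', 'table'
--     ]
--
--     relevant_sheets = []
--     for sheet in sheets:
--         sheet_lower = sheet.lower()
--         if any(keyword in sheet_lower for keyword in tariff_keywords):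
--             relevant_sheets.append(sheet)
--
--     return relevant_sheets
-- ===== SOURCE B (Python) =====
-- def find_tariff_sheets(sheets):
--     """Identify sheets likely to contain tariff data"""
--     tariff_keywords = [
--         'annex', 'lv', 'hv', 'ehv', 'charge', 'tariff', 'rate',
--         'domestic', 'non-domestic', 'unmetered', 'ums',
--         'capacity', 'unit', 'schedule', 'table'
--     ]
--
--     def matches(s):
--         # single left-to-right scan: at each offset, try each keyword as a prefix
--         for i in range(len(s)):
--             for keyword in tariff_keywords:
--                 if s.startswith(keyword, i):
--                     return True
--         return False
--
--     return [sheet for sheet in sheets if matches(sheet.lower())]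
-- ===== Notes on version B (the rewrite author's own statement) =====
-- stated objective: alternative
-- what changed: B replaces A's per-keyword containment tests (any(keyword in sheet_lower)) with a single left-to-right position scan of each lowered name, testing every keyword as a prefix at each offset, and builds the result by a comprehension instead of an accumulator loop.
import Mathlib
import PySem

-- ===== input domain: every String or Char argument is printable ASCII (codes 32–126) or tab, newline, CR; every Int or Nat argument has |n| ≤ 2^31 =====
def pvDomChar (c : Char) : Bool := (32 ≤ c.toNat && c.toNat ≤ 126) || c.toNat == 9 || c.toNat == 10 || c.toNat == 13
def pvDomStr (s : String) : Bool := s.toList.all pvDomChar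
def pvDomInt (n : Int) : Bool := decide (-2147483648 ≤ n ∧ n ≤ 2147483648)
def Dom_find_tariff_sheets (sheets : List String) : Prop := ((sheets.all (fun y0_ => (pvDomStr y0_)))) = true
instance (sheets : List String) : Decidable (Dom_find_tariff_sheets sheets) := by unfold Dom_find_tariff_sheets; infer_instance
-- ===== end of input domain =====

-- B replaces A's per-keyword substring tests with a single left-to-right position scan
-- testing each keyword as a prefix at each offset (objective: alternative).

def tariffKeywords : List String :=
  ["annex", "lv", "hv", "ehv", "charge", "tariff", "rate",
   "domestic", "non-domestic", "unmetered", "ums",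
   "capacity", "unit", "schedule", "table"]

-- ===== PORT A =====
def find_tariff_sheets (sheets : List String) : List String :=
  sheets.foldl (fun relevant_sheets sheet =>
    let sheet_lower := PySem.Str.lower sheet
    if tariffKeywords.any (fun keyword => PySem.Str.isIn keyword sheet_lower) then
      relevant_sheets ++ [sheet]
    else relevant_sheets) []

-- ===== PORT B =====
-- 'for i in range(len(s)): any keyword is a prefix at i' as structural recursion over suffixes
def pvScanMatches (cs : List Char) : Bool :=
  match cs with
  | [] => false
  | _ :: t => tariffKeywords.any (fun keyword => keyword.toList.isPrefixOf cs) || pvScanMatches t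

def find_tariff_sheets_alt (sheets : List String) : List String :=
  sheets.filter (fun sheet => pvScanMatches (PySem.Chars.lower sheet.toList))

-- ===== PRECONDITION & SPEC =====
def Spec_find_tariff_sheets (sheets : List String) (out : List String) : Prop := out = find_tariff_sheets_alt sheets
instance (sheets : List String) (out : List String) : Decidable (Spec_find_tariff_sheets sheets out) := by unfold Spec_find_tariff_sheets; infer_instance

-- ===== CLAIM (what is proved, stated in full; the proofs are below) =====
def Claim_equal_find_tariff_sheets : Prop := ∀ (sheets : List String), Dom_find_tariff_sheets sheets → Spec_find_tariff_sheets sheets (find_tariff_sheets sheets)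

-- ===== LEMMAS AND PROOFS =====

-- the position scan finds a keyword iff some keyword is an infix
lemma pvScanMatches_iff (cs : List Char) :
    pvScanMatches cs = true ↔ ∃ k ∈ tariffKeywords, k.toList <:+: cs := by
  induction cs with
  | nil =>
      simp only [pvScanMatches]
      constructor
      · intro h; exact absurd h (by decide)
      · rintro ⟨k, hk, hinf⟩
        have : k.toList = [] := List.eq_nil_of_infix_nil hinf
        fin_cases hk <;> simp_all
  | cons c t ih =>
      simp only [pvScanMatches, Bool.or_eq_true, List.any_eq_true, ih]
      constructor
      · rintro (⟨k, hk, hp⟩ | ⟨k, hk, hi⟩)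
        · exact ⟨k, hk, (List.isPrefixOf_iff_prefix.mp hp).isInfix⟩
        · exact ⟨k, hk, List.infix_cons hi⟩
      · rintro ⟨k, hk, hinf⟩
        rcases List.infix_cons_iff.mp hinf with hp | hi
        · exact Or.inl ⟨k, hk, List.isPrefixOf_iff_prefix.mpr hp⟩
        · exact Or.inr ⟨k, hk, hi⟩

lemma pred_eq (sheet : String) :
    (tariffKeywords.any (fun keyword => PySem.Str.isIn keyword (PySem.Str.lower sheet)))
      = pvScanMatches (PySem.Chars.lower sheet.toList) := by
  rw [Bool.eq_iff_iff]
  simp only [List.any_eq_true, PySem.Str.isIn_iff_infix, PySem.Str.toList_lower,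
    pvScanMatches_iff]

-- ===== VERDICT (by name: the statement is the Claim_ definition above) =====
theorem find_tariff_sheets_spec : Claim_equal_find_tariff_sheets := by
  intro sheets _
  unfold Spec_find_tariff_sheets find_tariff_sheets find_tariff_sheets_alt
  rw [PySem.List.foldl_append_if_eq_filter]
  simp only [pred_eq, List.nil_append]
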